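-- pv_equiv track=rewrite | github.com/ArkoDattaSENSE/Sensetrack | website/refresh_deadlines.py | label_priority
-- ===== SOURCE A (Python) =====
-- def label_priority(label: str) -> int:
--     priorities = [
--         ("paper submission deadline", 6),
--         ("paper submission", 5),
--         ("full paper submission", 5),
--         ("full papers", 4),
--         ("submission deadline", 4),
--         ("submission via edas", 4),
--         ("extended abstracts", 3),
--         ("paper registration", 2),
--         ("abstract registration", 1),
--     ]
--     lowered = label.lower()
--     for token, score in priorities:
--         if token in lowered:
--             return score
--     return 0
-- ===== SOURCE B (Python) =====
-- def label_priority(label: str) -> int: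
--     priorities = [
--         ("paper submission deadline", 6),
--         ("paper submission", 5),
--         ("full paper submission", 5),
--         ("full papers", 4),
--         ("submission deadline", 4),
--         ("submission via edas", 4),
--         ("extended abstracts", 3),
--         ("paper registration", 2),
--         ("abstract registration", 1),
--     ]
--     lowered = label.lower()
--     return max((score for token, score in priorities if token in lowered), default=0)
-- ===== Notes on version B (the rewrite author's own statement) =====
-- stated objective: simpler
-- what changed: Replaces the first-match early-return loop with a single max-reduction over all matching tokens (default 0), correct because the score list is non-increasing.
import Mathlib
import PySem

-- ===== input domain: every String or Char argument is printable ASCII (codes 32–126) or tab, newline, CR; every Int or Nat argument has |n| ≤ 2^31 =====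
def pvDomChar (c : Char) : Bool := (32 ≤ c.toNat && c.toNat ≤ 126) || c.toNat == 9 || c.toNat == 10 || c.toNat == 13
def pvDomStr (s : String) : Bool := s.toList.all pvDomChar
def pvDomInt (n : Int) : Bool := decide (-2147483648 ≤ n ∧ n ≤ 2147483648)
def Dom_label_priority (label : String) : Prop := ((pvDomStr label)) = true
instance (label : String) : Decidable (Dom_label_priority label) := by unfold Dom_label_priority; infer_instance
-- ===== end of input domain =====

-- B replaces A's first-match early-return loop with a max-reduction over all matching tokens
-- (default 0); equivalent because the score list is non-increasing. Objective: simpler.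


-- ===== PORT A =====
def prioListA : List (String × Int) :=
  [("paper submission deadline", 6),
   ("paper submission", 5),
   ("full paper submission", 5),
   ("full papers", 4),
   ("submission deadline", 4),
   ("submission via edas", 4),
   ("extended abstracts", 3),
   ("paper registration", 2),
   ("abstract registration", 1)]

-- the for-loop with early return: first matching token's score, else 0
def firstMatch (lowered : String) : List (String × Int) → Int
  | [] => 0
  | (tok, score) :: rest =>
      if PySem.Str.isIn tok lowered then score else firstMatch lowered rest

def label_priority (label : String) : Int :=
  firstMatch (PySem.Str.lower label) prioListA

-- ===== PORT B =====
def prioListB : List (String × Int) :=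
  [("paper submission deadline", 6),
   ("paper submission", 5),
   ("full paper submission", 5),
   ("full papers", 4),
   ("submission deadline", 4),
   ("submission via edas", 4),
   ("extended abstracts", 3),
   ("paper registration", 2),
   ("abstract registration", 1)]

-- max((score for token, score in priorities if token in lowered), default=0)
def label_priority_alt (label : String) : Int :=
  let lowered := PySem.Str.lower label
  (PySem.List.max?
      ((prioListB.filter (fun p => PySem.Str.isIn p.1 lowered)).map Prod.snd)
      (fun y => y)).getD 0

-- ===== PRECONDITION & SPEC =====
def Spec_label_priority (label : String) (out : Int) : Prop := out = label_priority_alt label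
instance (label : String) (out : Int) : Decidable (Spec_label_priority label out) := by unfold Spec_label_priority; infer_instance

-- ===== CLAIM (what is proved, stated in full; the proofs are below) =====
def Claim_equal_label_priority : Prop := ∀ (label : String), Dom_label_priority label → Spec_label_priority label (label_priority label)

-- ===== LEMMAS AND PROOFS =====

-- first-match equals max-of-matches whenever the scores are non-increasing along the list
theorem firstMatch_eq_max (lowered : String) (l : List (String × Int))
    (h : l.Pairwise (fun a b => b.2 ≤ a.2)) :
    firstMatch lowered l =
      (PySem.List.max?
          ((l.filter (fun p => PySem.Str.isIn p.1 lowered)).map Prod.snd)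
          (fun y => y)).getD 0 := by
  induction l with
  | nil => simp [firstMatch, PySem.List.max?]
  | cons hd tl ih =>
      obtain ⟨tok, score⟩ := hd
      rw [List.pairwise_cons] at h
      obtain ⟨hle, htl⟩ := h
      by_cases hin : PySem.Str.isIn tok lowered = true
      · simp only [firstMatch, hin, if_true, List.filter_cons, List.map_cons]
        rw [PySem.List.max?_id_cons]
        have hmem := PySem.List.foldl_max_mem ((tl.filter (fun p => PySem.Str.isIn p.1 lowered)).map Prod.snd) score
        have hge := (PySem.List.le_foldl_max ((tl.filter (fun p => PySem.Str.isIn p.1 lowered)).map Prod.snd) score).1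
        have hle' : ((tl.filter (fun p => PySem.Str.isIn p.1 lowered)).map Prod.snd).foldl max score ≤ score := by
          rcases hmem with heq | hm
          · exact le_of_eq heq
          · obtain ⟨p, hp, hpe⟩ := List.mem_map.mp hm
            exact hpe ▸ hle p (List.mem_of_mem_filter hp)
        rw [Option.getD_some]
        exact (le_antisymm hle' hge).symm
      · rw [Bool.not_eq_true] at hin
        simp only [firstMatch, hin, Bool.false_eq_true, if_false, List.filter_cons]
        exact ih htl

-- ===== VERDICT (by name: the statement is the Claim_ definition above) =====
theorem label_priority_spec : Claim_equal_label_priority := by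
  intro label _
  unfold Spec_label_priority label_priority label_priority_alt
  exact firstMatch_eq_max (PySem.Str.lower label) prioListA (by decide)
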